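-- pv_equiv track=rewrite | github.com/cybermax-008/100daysOfCoding---CyberNinja | Python/Day2_Jan23_2021/Score_Test_cases.py | solution
-- ===== SOURCE A (Python) =====
-- def solution(T, R):
--     tt = [i[:-1]if i[-1].isalpha() else i for i in T]
--     tt_uni = set(tt)
--     failed = []
--     for t,r in zip(tt,R):
--         if t in failed:
--             continue
--         else:
--             if r != 'OK':
--                 failed.append(t)
--     score = (len(tt_uni)-len(failed))*100//len(tt_uni)
--     return score
-- ===== SOURCE B (Python) =====
-- def solution(T, R):
--     tt = [i[:-1] if i[-1].isalpha() else i for i in T]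
--     uniq = set(tt)
--     passed = sum(1 for t in uniq
--                  if all(r == 'OK' for x, r in zip(tt, R) if x == t))
--     return passed * 100 // len(uniq)
-- ===== Notes on version B (the rewrite author's own statement) =====
-- stated objective: alternative
-- what changed: A makes one pass over zip(tt,R) accumulating a growing failed-names list behind a membership guard; B has no failure accumulator at all: it iterates over the unique names and for each one rescans the zipped pairs to test that all its results are 'OK', counting the PASSED names directly (nested staged passes instead of a single guarded accumulation).
import Mathlib
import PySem

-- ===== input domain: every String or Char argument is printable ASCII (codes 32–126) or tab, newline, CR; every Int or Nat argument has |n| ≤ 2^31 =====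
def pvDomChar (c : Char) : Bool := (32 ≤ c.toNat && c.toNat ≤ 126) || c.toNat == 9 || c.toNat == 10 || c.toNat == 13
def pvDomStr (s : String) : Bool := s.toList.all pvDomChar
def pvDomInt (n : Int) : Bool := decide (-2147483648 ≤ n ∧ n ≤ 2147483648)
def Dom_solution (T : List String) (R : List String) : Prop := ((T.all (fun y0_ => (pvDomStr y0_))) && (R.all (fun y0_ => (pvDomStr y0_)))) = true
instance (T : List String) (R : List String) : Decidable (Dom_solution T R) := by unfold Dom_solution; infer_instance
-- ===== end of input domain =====

-- B drops A's failed-list accumulation entirely: it iterates over the unique names and counts the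
-- names all of whose zipped results are 'OK' (alternative decomposition; not claimed faster).

-- ===== PORT A =====
-- shared helper: the trimming expression 'i[:-1] if i[-1].isalpha() else i', identical in both Pythons
-- (the 'none' branch is Python's IndexError on the empty string, excluded by Pre_solution)
def pvTrim (s : String) : String :=
  match PySem.Str.pyGet? s (-1) with
  | some c => if PySem.Chars.isalpha c then PySem.Str.slice s none (some (-1)) else s
  | none => s

def solution (T : List String) (R : List String) : Int :=
  let tt := T.map pvTrim
  let tt_uni := PySem.Set.ofList tt
  let failed := (tt.zip R).foldl
    (fun failed p => if failed.contains p.1 then failed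
                     else if p.2 ≠ "OK" then failed ++ [p.1] else failed)
    ([] : List String)
  PySem.Int.floordiv (((tt_uni.length : Int) - (failed.length : Int)) * 100) (tt_uni.length : Int)

-- ===== PORT B =====
def solution_alt (T : List String) (R : List String) : Int :=
  let tt := T.map pvTrim
  let uniq := PySem.Set.ofList tt
  let passed : Int :=
    ((uniq.filter (fun t =>
        ((tt.zip R).filter (fun p => p.1 == t)).all (fun p => p.2 == "OK"))).length : Int)
  PySem.Int.floordiv (passed * 100) (uniq.length : Int)

-- ===== PRECONDITION & SPEC =====
-- Pre_ excludes exactly the inputs on which the Python A raises: an empty string in T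
-- (IndexError on i[-1]) and T = [] (ZeroDivisionError); B raises on the same inputs.
def Pre_solution (T : List String) (R : List String) : Prop :=
  T ≠ [] ∧ ∀ s ∈ T, s ≠ ""
instance (T : List String) (R : List String) : Decidable (Pre_solution T R) := by
  unfold Pre_solution; infer_instance
def pvWitness_solution : List String × List String :=
  (["test1a", "test1b", "test2"], ["OK", "Wrong", "OK"])

def Spec_solution (T : List String) (R : List String) (out : Int) : Prop := out = solution_alt T R
instance (T : List String) (R : List String) (out : Int) : Decidable (Spec_solution T R out) := by
  unfold Spec_solution; infer_instance

-- ===== CLAIM (what is proved, stated in full; the proofs are below) =====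
def Claim_equal_solution : Prop := ∀ (T : List String) (R : List String), Dom_solution T R → Pre_solution T R → Spec_solution T R (solution T R)

-- ===== LEMMAS AND PROOFS =====

-- two nodup lists with the same members have the same length
theorem pv_length_eq_of_nodup_mem {α : Type} {l1 l2 : List α}
    (h1 : l1.Nodup) (h2 : l2.Nodup) (h : ∀ t, t ∈ l1 ↔ t ∈ l2) :
    l1.length = l2.length :=
  ((List.perm_ext_iff_of_nodup h1 h2).mpr h).length_eq

-- characterisation of A's failed-list loop: nodup, and membership = "some zipped result for t is not OK"
theorem pv_Afold_char (zs : List (String × String)) (acc : List String) (hacc : acc.Nodup) :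
    (zs.foldl (fun failed p => if failed.contains p.1 then failed
                     else if p.2 ≠ "OK" then failed ++ [p.1] else failed) acc).Nodup ∧
    ∀ t, t ∈ zs.foldl (fun failed p => if failed.contains p.1 then failed
                     else if p.2 ≠ "OK" then failed ++ [p.1] else failed) acc ↔
      t ∈ acc ∨ ∃ r, (t, r) ∈ zs ∧ r ≠ "OK" := by
  induction zs generalizing acc with
  | nil => exact ⟨hacc, by simp⟩
  | cons p rest ih =>
    obtain ⟨t0, r0⟩ := p
    simp only [List.foldl_cons]
    by_cases hmem : acc.contains t0 = true
    · rw [if_pos hmem]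
      obtain ⟨hn, hm⟩ := ih acc hacc
      refine ⟨hn, fun t => ?_⟩
      rw [hm t]
      constructor
      · rintro (h | ⟨r, hr, hne⟩)
        · exact Or.inl h
        · exact Or.inr ⟨r, List.mem_cons_of_mem _ hr, hne⟩
      · rintro (h | ⟨r, hr, hne⟩)
        · exact Or.inl h
        · rcases List.mem_cons.mp hr with heq | hr'
          · obtain ⟨h1, h2⟩ := Prod.mk.injEq .. ▸ heq
            exact Or.inl (h1 ▸ (List.contains_iff_mem.mp hmem))
          · exact Or.inr ⟨r, hr', hne⟩
    · rw [if_neg hmem]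
      by_cases hok : r0 ≠ "OK"
      · rw [if_pos hok]
        have hacc' : (acc ++ [t0]).Nodup := by
          refine List.Nodup.append hacc (List.nodup_singleton t0) ?_
          intro a ha hb
          rw [List.mem_singleton] at hb
          subst hb
          exact hmem (List.contains_iff_mem.mpr ha)
        obtain ⟨hn, hm⟩ := ih (acc ++ [t0]) hacc'
        refine ⟨hn, fun t => ?_⟩
        rw [hm t]
        constructor
        · rintro (h | ⟨r, hr, hne⟩)
          · rcases List.mem_append.mp h with h' | h'
            · exact Or.inl h'
            · simp at h'
              exact Or.inr ⟨r0, by simp [h'], hok⟩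
          · exact Or.inr ⟨r, List.mem_cons_of_mem _ hr, hne⟩
        · rintro (h | ⟨r, hr, hne⟩)
          · exact Or.inl (List.mem_append_left _ h)
          · rcases List.mem_cons.mp hr with heq | hr'
            · obtain ⟨h1, h2⟩ := Prod.mk.injEq .. ▸ heq
              exact Or.inl (by simp [h1])
            · exact Or.inr ⟨r, hr', hne⟩
      · rw [if_neg hok]
        simp only [ne_eq, not_not] at hok
        subst hok
        obtain ⟨hn, hm⟩ := ih acc hacc
        refine ⟨hn, fun t => ?_⟩
        rw [hm t]
        constructor
        · rintro (h | ⟨r, hr, hne⟩)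
          · exact Or.inl h
          · exact Or.inr ⟨r, List.mem_cons_of_mem _ hr, hne⟩
        · rintro (h | ⟨r, hr, hne⟩)
          · exact Or.inl h
          · rcases List.mem_cons.mp hr with heq | hr'
            · obtain ⟨h1, h2⟩ := Prod.mk.injEq .. ▸ heq
              exact absurd (h2 ▸ hne) (by simp)
            · exact Or.inr ⟨r, hr', hne⟩

-- B's per-name test fails exactly when some zipped result for t is not 'OK'
theorem pv_allOK_false_iff (zs : List (String × String)) (t : String) :
    ((zs.filter (fun p => p.1 == t)).all (fun p => p.2 == "OK")) = false ↔
      ∃ r, (t, r) ∈ zs ∧ r ≠ "OK" := by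
  simp only [List.all_eq_false, List.mem_filter, beq_iff_eq]
  constructor
  · rintro ⟨p, ⟨hp, hpt⟩, hb⟩
    exact ⟨p.2, by rwa [show (t, p.2) = p from (Prod.ext hpt.symm rfl)], by simpa using hb⟩
  · rintro ⟨r, hr, hne⟩
    exact ⟨(t, r), ⟨hr, rfl⟩, by simpa using hne⟩

-- the count of passed unique names equals |uniq| - |failed|
theorem pv_passed_eq (tt : List String) (R : List String) :
    (((PySem.Set.ofList tt).filter (fun t =>
        ((tt.zip R).filter (fun p => p.1 == t)).all (fun p => p.2 == "OK"))).length : Int)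
    = ((PySem.Set.ofList tt).length : Int)
      - (((tt.zip R).foldl (fun failed p => if failed.contains p.1 then failed
                      else if p.2 ≠ "OK" then failed ++ [p.1] else failed) ([] : List String)).length : Int) := by
  obtain ⟨hAn, hAm⟩ := pv_Afold_char (tt.zip R) [] List.nodup_nil
  set failed := (tt.zip R).foldl (fun failed p => if failed.contains p.1 then failed
                      else if p.2 ≠ "OK" then failed ++ [p.1] else failed) ([] : List String)
  set uniq := PySem.Set.ofList tt with huniq
  have hun : uniq.Nodup := PySem.Set.nodup_ofList tt
  set P : String → Bool := fun t =>
      ((tt.zip R).filter (fun p => p.1 == t)).all (fun p => p.2 == "OK") with hP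
  -- failed has the same members as uniq.filter (!P ·)
  have hlen : failed.length = (uniq.filter (fun t => !(P t))).length := by
    apply pv_length_eq_of_nodup_mem hAn (hun.filter _)
    intro t
    rw [List.mem_filter, hAm t]
    simp only [List.not_mem_nil, false_or, Bool.not_eq_true', hP, pv_allOK_false_iff]
    constructor
    · rintro ⟨r, hr, hne⟩
      have ht : t ∈ tt := (List.of_mem_zip hr).1
      exact ⟨(PySem.Set.mem_ofList tt t).mpr ht, r, hr, hne⟩
    · rintro ⟨_, h⟩; exact h
  have hsplit : uniq.length = (uniq.filter P).length + (uniq.filter (fun t => !(P t))).length := by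
    simpa using (List.length_eq_length_filter_add (l := uniq) P)
  rw [hlen]
  omega

-- ===== VERDICT (by name: the statement is the Claim_ definition above) =====
theorem solution_spec : Claim_equal_solution := by
  intro T R _ _
  unfold Spec_solution solution solution_alt
  simp only []
  rw [pv_passed_eq (T.map pvTrim) R]
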